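-- pv_equiv track=rewrite | github.com/ESFJ-MoZhu/2026SDU | Project3/main.py | string_to_elements
-- ===== SOURCE A (Python) =====
-- from typing import List, Optional, Tuple
--
-- def string_to_elements(text: str) -> List[int]:
--     """将字符串转换为域元素(用于哈希文本)"""
--     data = text.encode('utf-8')
--     elements = []
--     chunk_size = 31  # 对BN254域安全
--
--     for i in range(0, len(data), chunk_size):
--         chunk = data[i:i + chunk_size]
--         element = int.from_bytes(chunk, 'big')
--         elements.append(element)
--
--     return elements
-- ===== SOURCE B (Python) =====
-- def string_to_elements(text):
--     """Single-pass Horner accumulation over the UTF-8 bytes (no slicing/int.from_bytes)."""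
--     elements = []
--     acc = 0
--     n = 0
--     for b in text.encode('utf-8'):
--         acc = acc * 256 + b
--         n += 1
--         if n == 31:
--             elements.append(acc)
--             acc = 0
--             n = 0
--     if n > 0:
--         elements.append(acc)
--     return elements
-- ===== Notes on version B (the rewrite author's own statement) =====
-- stated objective: alternative
-- what changed: Replaces the chunk-slicing loop with int.from_bytes by a single pass over the bytes that Horner-accumulates each 31-byte group with a running counter.
import Mathlib
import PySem

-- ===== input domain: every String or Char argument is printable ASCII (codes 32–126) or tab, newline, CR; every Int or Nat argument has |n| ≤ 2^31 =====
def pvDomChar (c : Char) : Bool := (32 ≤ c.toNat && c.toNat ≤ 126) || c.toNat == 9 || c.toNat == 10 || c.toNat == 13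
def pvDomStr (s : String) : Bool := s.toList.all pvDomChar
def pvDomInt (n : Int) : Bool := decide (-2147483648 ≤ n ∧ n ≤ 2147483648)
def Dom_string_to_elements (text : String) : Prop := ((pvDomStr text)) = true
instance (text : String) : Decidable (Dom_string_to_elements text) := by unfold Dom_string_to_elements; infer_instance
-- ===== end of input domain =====

-- B replaces A's chunk-slicing loop (int.from_bytes per 31-byte slice) by one pass of
-- Horner accumulation with a byte counter; alternative decomposition, same cost.


-- ===== PORT A =====
-- text.encode('utf-8'): exact on the ASCII domain Dom_, where each byte is the char code
def pvBytes (text : String) : List Int := text.toList.map (fun c => (c.toNat : Int))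

-- int.from_bytes(chunk, 'big')
def pvFromBytesBE (bs : List Int) : Int := bs.foldl (fun a b => a * 256 + b) 0

def string_to_elements (text : String) : List Int :=
  let data := pvBytes text
  let chunk_size : Int := 31
  (PySem.List.pyRange 0 (data.length : Int) chunk_size).foldl
    (fun elements i =>
      elements ++ [pvFromBytesBE (PySem.List.slice data (some i) (some (i + chunk_size)))])
    []

-- ===== PORT B =====
-- the body of B's per-byte loop: state (elements, acc, n)
def pvStepB (s : List Int × Int × Int) (b : Int) : List Int × Int × Int :=
  let acc := s.2.1 * 256 + b
  let n := s.2.2 + 1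
  if n == 31 then (s.1 ++ [acc], 0, 0) else (s.1, acc, n)

def string_to_elements_alt (text : String) : List Int :=
  let st := (pvBytes text).foldl pvStepB ([], 0, 0)
  if st.2.2 > 0 then st.1 ++ [st.2.1] else st.1

-- ===== PRECONDITION & SPEC =====
def Spec_string_to_elements (text : String) (out : List Int) : Prop := out = string_to_elements_alt text
instance (text : String) (out : List Int) : Decidable (Spec_string_to_elements text out) := by unfold Spec_string_to_elements; infer_instance

-- ===== CLAIM (what is proved, stated in full; the proofs are below) =====
def Claim_equal_string_to_elements : Prop := ∀ (text : String), Dom_string_to_elements text → Spec_string_to_elements text (string_to_elements text)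

-- ===== LEMMAS AND PROOFS =====

-- recursive characterisation of A's chunking (proof helper)
def pvChunksA (bs : List Int) : List Int :=
  if h : bs = [] then [] else pvFromBytesBE (bs.take 31) :: pvChunksA (bs.drop 31)
termination_by bs.length
decreasing_by
  cases bs with
  | nil => exact absurd rfl h
  | cons x xs => simp

theorem pvRange31_nil (a b : Int) (h : b ≤ a) : PySem.List.pyRange a b 31 = [] := by
  rw [PySem.List.pyRange_of_pos a b (by norm_num)]
  simp [not_lt.mpr h]

theorem pvRange31_cons (a b : Int) (hab : a < b) :
    PySem.List.pyRange a b 31 = a :: PySem.List.pyRange (a + 31) b 31 := by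
  rw [PySem.List.pyRange_of_pos a b (by norm_num), PySem.List.pyRange_of_pos (a+31) b (by norm_num)]
  have hc : ((b - a + 31 - 1) / 31).toNat
      = (if a + 31 < b then ((b - (a + 31) + 31 - 1) / 31).toNat else 0) + 1 := by
    split_ifs with h <;> omega
  rw [if_pos hab, hc, List.range_succ_eq_map, List.map_cons, List.map_map]
  congr 1
  · simp
  · apply List.map_congr_left
    intro k _
    simp only [Function.comp]
    push_cast
    ring

theorem pvAloopEq (bs : List Int) : ∀ (k : Nat) (a : Int), 0 ≤ a → bs.length - a.toNat ≤ k →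
    ∀ es : List Int,
    (PySem.List.pyRange a (bs.length : Int) 31).foldl
      (fun elements i =>
        elements ++ [pvFromBytesBE (PySem.List.slice bs (some i) (some (i + 31)))]) es
    = es ++ pvChunksA (bs.drop a.toNat) := by
  intro k
  induction k with
  | zero =>
    intro a ha hk es
    have hge : (bs.length : Int) ≤ a := by omega
    rw [pvRange31_nil a _ hge]
    have : bs.drop a.toNat = [] := List.drop_eq_nil_of_le (by omega)
    simp [this, pvChunksA]
  | succ k ih =>
    intro a ha hk es
    by_cases hlt : a < (bs.length : Int)
    · rw [pvRange31_cons a _ hlt, List.foldl_cons]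
      rw [ih (a + 31) (by omega) (by omega)]
      have hslice : PySem.List.slice bs (some a) (some (a + 31)) = (bs.drop a.toNat).take 31 := by
        rw [PySem.List.slice_toNat bs ha (by omega)]
        congr 1
        omega
      have hne : bs.drop a.toNat ≠ [] := by
        intro h
        have := congrArg List.length h
        simp at this
        omega
      have hdd : (bs.drop a.toNat).drop 31 = bs.drop (a + 31).toNat := by
        rw [List.drop_drop]
        congr 1
        omega
      conv_rhs => rw [pvChunksA]
      rw [dif_neg hne, hslice, hdd]
      simp
    · have hge : (bs.length : Int) ≤ a := by omega
      rw [pvRange31_nil a _ hge]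
      have : bs.drop a.toNat = [] := List.drop_eq_nil_of_le (by omega)
      simp [this, pvChunksA]

theorem pvB_noflush (bs : List Int) : ∀ (es : List Int) (acc n : Int), 0 ≤ n →
    n + bs.length < 31 →
    bs.foldl pvStepB (es, acc, n) = (es, bs.foldl (fun a b => a * 256 + b) acc, n + bs.length) := by
  induction bs with
  | nil => intro es acc n _ _; simp
  | cons b rest ih =>
    intro es acc n hn hlen
    simp only [List.length_cons] at hlen
    have hne : (n + 1 == 31) = false := by
      simp only [beq_eq_false_iff_ne, ne_eq]
      omega
    simp only [List.foldl_cons, pvStepB, hne, Bool.false_eq_true, if_false]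
    rw [ih es (acc * 256 + b) (n + 1) (by omega) (by push_cast at hlen; omega)]
    simp only [Prod.mk.injEq, List.length_cons]
    refine ⟨trivial, trivial, ?_⟩
    push_cast
    ring

theorem pvB_flush (bs : List Int) : ∀ (es : List Int) (acc n : Int), 0 ≤ n →
    n + bs.length = 31 → bs ≠ [] →
    bs.foldl pvStepB (es, acc, n) = (es ++ [bs.foldl (fun a b => a * 256 + b) acc], 0, 0) := by
  induction bs with
  | nil => intro _ _ _ _ _ h; exact absurd rfl h
  | cons b rest ih =>
    intro es acc n hn hlen _
    simp only [List.length_cons] at hlen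
    by_cases hr : rest = []
    · subst hr
      simp only [List.length_nil] at hlen
      have : (n + 1 == 31) = true := by
        simp only [beq_iff_eq]
        omega
      simp [List.foldl_cons, pvStepB, this]
    · have hrl : 1 ≤ rest.length := by
        cases rest with
        | nil => exact absurd rfl hr
        | cons _ _ => simp
      have hne : (n + 1 == 31) = false := by
        simp only [beq_eq_false_iff_ne, ne_eq]
        omega
      simp only [List.foldl_cons, pvStepB, hne, Bool.false_eq_true, if_false]
      exact ih es (acc * 256 + b) (n + 1) (by omega) (by push_cast at hlen; omega) hr

theorem pvMain : ∀ (k : Nat) (bs : List Int), bs.length ≤ k → ∀ es : List Int,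
    (if (bs.foldl pvStepB (es, 0, 0)).2.2 > 0
      then (bs.foldl pvStepB (es, 0, 0)).1 ++ [(bs.foldl pvStepB (es, 0, 0)).2.1]
      else (bs.foldl pvStepB (es, 0, 0)).1)
    = es ++ pvChunksA bs := by
  intro k
  induction k with
  | zero =>
    intro bs hk es
    have : bs = [] := List.eq_nil_of_length_eq_zero (by omega)
    subst this
    simp [pvChunksA]
  | succ k ih =>
    intro bs hk es
    by_cases h0 : bs = []
    · subst h0; simp [pvChunksA]
    · by_cases h31 : bs.length < 31
      · have hpos : 0 < bs.length := List.length_pos_of_ne_nil h0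
        rw [pvB_noflush bs es 0 0 le_rfl (by push_cast; omega)]
        split_ifs with hif
        · conv_rhs => rw [pvChunksA]
          rw [dif_neg h0, List.take_of_length_le (by omega),
              List.drop_eq_nil_of_le (by omega)]
          simp [pvChunksA, pvFromBytesBE]
        · exact absurd (show (0 : Int) + (bs.length : Int) > 0 by push_cast; omega) hif
      · have hsplit : bs = bs.take 31 ++ bs.drop 31 := (List.take_append_drop 31 bs).symm
        have hlt : (bs.take 31).length = 31 := by
          simp [List.length_take]
          omega
        have htne : bs.take 31 ≠ [] := by
          intro h
          have := congrArg List.length h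
          simp [hlt] at this
        conv_lhs => rw [hsplit]
        rw [List.foldl_append,
            pvB_flush (bs.take 31) es 0 0 le_rfl (by simp [hlt]) htne]
        rw [ih (bs.drop 31) (by simp only [List.length_drop]; omega) (es ++ [(bs.take 31).foldl (fun a b => a * 256 + b) 0])]
        conv_rhs => rw [pvChunksA]
        rw [dif_neg h0]
        simp [pvFromBytesBE]

-- ===== VERDICT (by name: the statement is the Claim_ definition above) =====
theorem string_to_elements_spec : Claim_equal_string_to_elements := by
  intro text _
  unfold Spec_string_to_elements string_to_elements string_to_elements_alt
  rw [pvAloopEq (pvBytes text) (pvBytes text).length 0 le_rfl (by simp)]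
  rw [pvMain (pvBytes text).length (pvBytes text) le_rfl]
  simp
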